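-- pv_equiv track=rewrite | github.com/slavivo/user-profile | utils/activity_generation.py | format_taxonomy_text
-- ===== SOURCE A (Python) =====
-- from typing import Dict, List, Any, Tuple
--
-- def format_taxonomy_text(taxonomy: Dict[str, Any]) -> str:
--     """Format taxonomy dictionary into a readable text format."""
--     if not taxonomy:
--         return ""
--
--     result = "Taxonomy Classification:\n"
--
--     # Format processing levels
--     if "processing_levels" in taxonomy:
--         result += "Processing Levels:\n"
--         for key, value in taxonomy["processing_levels"].items():
--             result += f"- {key.replace('_', ' ').title()}: {value}%\n"
--
--     # Format knowledge domains
--     if "knowledge_domains" in taxonomy: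
--         result += "Knowledge Domains:\n"
--         for key, value in taxonomy["knowledge_domains"].items():
--             result += f"- {key.replace('_', ' ').title()}: {value}%\n"
--
--     return result.strip()
-- ===== SOURCE B (Python) =====
-- TABLE = [("processing_levels", "Processing Levels"),
--          ("knowledge_domains", "Knowledge Domains")]
--
-- def _entries(items):
--     """Render entries back-to-front by recursion; each line carries its separating
--     newline as a PREFIX, so no trailing newline and no final strip is ever needed."""
--     if not items:
--         return ""
--     k, v = items[0]
--     return "\n- " + k.replace("_", " ").title() + ": " + str(v) + "%" + _entries(items[1:])
--
-- def _render(table, taxonomy):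
--     if not table:
--         return ""
--     key, title = table[0]
--     rest = _render(table[1:], taxonomy)
--     if key in taxonomy:
--         return "\n" + title + ":" + _entries(list(taxonomy[key].items())) + rest
--     return rest
--
-- def format_taxonomy_text(taxonomy):
--     """Format taxonomy dictionary into a readable text format."""
--     if not taxonomy:
--         return ""
--     return "Taxonomy Classification:" + _render(TABLE, taxonomy)
-- ===== Notes on version B (the rewrite author's own statement) =====
-- stated objective: alternative
-- what changed: Replaces A's forward accumulate-then-strip loop (each line appended with a trailing newline, final .strip()) with a pure right-recursion over a section table that builds the text back-to-front with each line carrying its separating newline as a prefix, so no accumulator mutation, no trailing newline and no strip exist.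
import Mathlib
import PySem

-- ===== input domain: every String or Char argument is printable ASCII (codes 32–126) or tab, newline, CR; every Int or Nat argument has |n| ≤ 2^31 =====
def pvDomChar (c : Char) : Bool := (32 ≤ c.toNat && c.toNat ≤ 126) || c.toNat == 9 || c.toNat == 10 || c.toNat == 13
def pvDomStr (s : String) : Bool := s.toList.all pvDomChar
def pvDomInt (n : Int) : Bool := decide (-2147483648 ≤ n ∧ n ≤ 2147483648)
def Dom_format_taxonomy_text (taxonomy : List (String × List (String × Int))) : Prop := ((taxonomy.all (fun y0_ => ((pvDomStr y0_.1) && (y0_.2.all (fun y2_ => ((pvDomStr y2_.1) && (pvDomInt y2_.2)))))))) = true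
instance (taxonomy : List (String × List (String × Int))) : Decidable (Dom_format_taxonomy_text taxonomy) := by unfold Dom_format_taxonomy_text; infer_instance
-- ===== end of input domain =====

-- B replaces A's forward accumulate-then-strip loop by a pure right-recursion over a section
-- table that builds the text back-to-front with newline PREFIXES (so no strip is needed);
-- objective: alternative — the return values are identical.

-- ===== PORT A =====

-- Python str.title() on the key after replace('_', ' '): a letter is uppercased when the
-- previous character is not a letter, lowercased otherwise (exact on the ASCII domain,
-- where 'cased' = letter); ported by hand, carrying the previous-char-was-a-letter flag.
def pvTitleGo : List Char → Bool → List Char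
  | [], _ => []
  | c :: rest, prev =>
    (if c.isAlpha then (if prev then c.toLower else c.toUpper) else c) :: pvTitleGo rest c.isAlpha

-- f"- {key.replace('_', ' ').title()}: {value}%"  (A's per-entry line, without newline)
def pvEntryLine (k : String) (v : Int) : List Char :=
  ['-', ' '] ++ pvTitleGo (PySem.Chars.replace k.toList ['_'] [' ']) false
    ++ [':', ' '] ++ (PySem.Int.toStr v).toList ++ ['%']

def format_taxonomy_text (taxonomy : List (String × List (String × Int))) : String :=
  if taxonomy = [] then ""
  else
    let d : PySem.Dict String (List (String × Int)) := PySem.Dict.mk taxonomy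
    let result : List Char := "Taxonomy Classification:\n".toList
    let result : List Char :=
      if d.contains "processing_levels" then
        (d.getD "processing_levels" []).foldl
          (fun r p => r ++ pvEntryLine p.1 p.2 ++ ['\n'])
          (result ++ "Processing Levels:\n".toList)
      else result
    let result : List Char :=
      if d.contains "knowledge_domains" then
        (d.getD "knowledge_domains" []).foldl
          (fun r p => r ++ pvEntryLine p.1 p.2 ++ ['\n'])
          (result ++ "Knowledge Domains:\n".toList)
      else result
    String.ofList (PySem.Chars.strip result)

-- ===== PORT B =====

-- Source B's _entries: right recursion, each entry line prefixed by its newline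
def pvEntriesB : List (String × Int) → List Char
  | [] => []
  | (k, v) :: rest =>
    "\n- ".toList ++ pvTitleGo (PySem.Chars.replace k.toList ['_'] [' ']) false
      ++ ": ".toList ++ (PySem.Int.toStr v).toList ++ ['%'] ++ pvEntriesB rest

-- Source B's _render: right recursion over the section table
def pvRenderB : List (String × String) → PySem.Dict String (List (String × Int)) → List Char
  | [], _ => []
  | (key, title) :: table, d =>
    let rest := pvRenderB table d
    if d.contains key then '\n' :: title.toList ++ [':'] ++ pvEntriesB (d.getD key []) ++ rest
    else rest

def format_taxonomy_text_alt (taxonomy : List (String × List (String × Int))) : String :=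
  if taxonomy = [] then ""
  else
    String.ofList ("Taxonomy Classification:".toList ++
      pvRenderB [("processing_levels", "Processing Levels"),
                 ("knowledge_domains", "Knowledge Domains")] (PySem.Dict.mk taxonomy))

-- ===== PRECONDITION & SPEC =====
def Spec_format_taxonomy_text (taxonomy : List (String × List (String × Int))) (out : String) : Prop := out = format_taxonomy_text_alt taxonomy
instance (taxonomy : List (String × List (String × Int))) (out : String) : Decidable (Spec_format_taxonomy_text taxonomy out) := by unfold Spec_format_taxonomy_text; infer_instance

-- ===== CLAIM (what is proved, stated in full; the proofs are below) =====
def Claim_equal_format_taxonomy_text : Prop := ∀ (taxonomy : List (String × List (String × Int))), Dom_format_taxonomy_text taxonomy → Spec_format_taxonomy_text taxonomy (format_taxonomy_text taxonomy)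

-- ===== LEMMAS AND PROOFS =====

-- a line that ends in a non-whitespace character (so the final strip cannot touch it)
def pvEndSolid (l : List Char) : Prop := ∃ Y c, l = Y ++ [c] ∧ PySem.Chars.isspace c = false

theorem pvEndSolid_entry (k : String) (v : Int) : pvEndSolid (pvEntryLine k v) :=
  ⟨['-', ' '] ++ pvTitleGo (PySem.Chars.replace k.toList ['_'] [' ']) false
    ++ [':', ' '] ++ (PySem.Int.toStr v).toList, '%', by simp [pvEntryLine], by decide⟩

theorem pvEndSolid_title (t : String) : pvEndSolid (t.toList ++ [':']) :=
  ⟨t.toList, ':', rfl, by decide⟩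

theorem pvEndSolid_append (a b : List Char) (h : pvEndSolid b) : pvEndSolid (a ++ b) := by
  obtain ⟨Y, c, rfl, hc⟩ := h
  exact ⟨a ++ Y, c, by simp, hc⟩

theorem pvEndSolid_flat (L : List (List Char)) (hL : L ≠ [])
    (hends : ∀ l ∈ L, pvEndSolid l) :
    pvEndSolid (List.flatMap (fun l => '\n' :: l) L) := by
  induction L with
  | nil => cases hL rfl
  | cons l L ih =>
    cases L with
    | nil =>
      obtain ⟨Y, c, hl, hc⟩ := hends l (by simp)
      exact ⟨'\n' :: Y, c, by simp [hl], hc⟩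
    | cons b M =>
      have := ih (by simp) (fun x hx => hends x (List.mem_cons_of_mem l hx))
      simpa using pvEndSolid_append ('\n' :: l) _ this

theorem pvRstrip_solid (l : List Char) (h : pvEndSolid l) :
    PySem.Chars.rstrip (l ++ ['\n']) = l := by
  obtain ⟨Y, c, rfl, hc⟩ := h
  unfold PySem.Chars.rstrip
  have hnl : PySem.Chars.isspace '\n' = true := by decide
  simp [List.dropWhile, hnl, hc]

theorem pvLstrip_cons (c : Char) (t : List Char) (hc : PySem.Chars.isspace c = false) :
    PySem.Chars.lstrip (c :: t) = c :: t := by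
  simp [PySem.Chars.lstrip, List.dropWhile, hc]

-- shifting trailing newlines to leading newlines
theorem pvShift (L : List (List Char)) :
    '\n' :: List.flatMap (fun l => l ++ ['\n']) L
      = List.flatMap (fun l => '\n' :: l) L ++ ['\n'] := by
  induction L with
  | nil => rfl
  | cons l L ih =>
    simp only [List.flatMap_cons, List.append_assoc, List.nil_append, List.cons_append, ih]

theorem pvStripMain (L : List (List Char)) (hends : ∀ l ∈ L, pvEndSolid l) :
    PySem.Chars.strip
      ("Taxonomy Classification:".toList ++ List.flatMap (fun l => '\n' :: l) L ++ ['\n'])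
      = "Taxonomy Classification:".toList ++ List.flatMap (fun l => '\n' :: l) L := by
  have hdr : "Taxonomy Classification:".toList
      = 'T' :: "axonomy Classification:".toList := by decide
  have hsolid : pvEndSolid ("Taxonomy Classification:".toList ++ List.flatMap (fun l => '\n' :: l) L) := by
    cases hL : L with
    | nil =>
      simp only [List.flatMap_nil, List.append_nil]
      exact ⟨"Taxonomy Classification".toList, ':', by decide, by decide⟩
    | cons b M =>
      exact pvEndSolid_append _ _ (pvEndSolid_flat _ (by simp) (hL ▸ hends))
  have ht : "Taxonomy Classification:".toList ++ List.flatMap (fun l => '\n' :: l) L ++ ['\n']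
      = 'T' :: ("axonomy Classification:".toList ++ List.flatMap (fun l => '\n' :: l) L ++ ['\n']) := by
    rw [hdr]; simp
  unfold PySem.Chars.strip
  rw [ht, pvLstrip_cons _ _ (by decide), ← ht]
  exact pvRstrip_solid _ hsolid

-- the common shape: A's pre-strip text with trailing newlines vs B's prefix-newline text
theorem pvCase (L : List (List Char)) (xs : List Char)
    (hx : xs = "Taxonomy Classification:".toList ++ '\n' :: List.flatMap (fun l => l ++ ['\n']) L)
    (hends : ∀ l ∈ L, pvEndSolid l) :
    String.ofList (PySem.Chars.strip xs)
      = String.ofList ("Taxonomy Classification:".toList ++ List.flatMap (fun l => '\n' :: l) L) := by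
  rw [hx]
  have : "Taxonomy Classification:".toList ++ '\n' :: List.flatMap (fun l => l ++ ['\n']) L
      = "Taxonomy Classification:".toList ++ List.flatMap (fun l => '\n' :: l) L ++ ['\n'] := by
    rw [List.append_assoc, ← pvShift]
  rw [this, pvStripMain L hends]

theorem pvEntriesB_flat (s : List (String × Int)) :
    pvEntriesB s = List.flatMap (fun l => '\n' :: l) (s.map (fun p => pvEntryLine p.1 p.2)) := by
  induction s with
  | nil => rfl
  | cons p s ih =>
    obtain ⟨k, v⟩ := p
    have h1 : "\n- ".toList = ['\n', '-', ' '] := by decide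
    have h2 : ": ".toList = [':', ' '] := by decide
    simp only [pvEntriesB, List.map_cons, List.flatMap_cons, ih, pvEntryLine, h1, h2,
      List.append_assoc, List.cons_append, List.nil_append]
  
-- ===== VERDICT (by name: the statement is the Claim_ definition above) =====
set_option maxHeartbeats 1000000 in
theorem format_taxonomy_text_spec : Claim_equal_format_taxonomy_text := by
  intro taxonomy _
  unfold Spec_format_taxonomy_text format_taxonomy_text format_taxonomy_text_alt
  by_cases ht : taxonomy = []
  · rw [if_pos ht, if_pos ht]
  · rw [if_neg ht, if_neg ht]
    have hH : "Taxonomy Classification:\n".toList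
        = "Taxonomy Classification:".toList ++ ['\n'] := by decide
    have hP : "Processing Levels:\n".toList
        = ("Processing Levels".toList ++ [':']) ++ ['\n'] := by decide
    have hK : "Knowledge Domains:\n".toList
        = ("Knowledge Domains".toList ++ [':']) ++ ['\n'] := by decide
    have hends1 : ∀ (t : String) (s : List (String × Int)), ∀ l ∈ (t.toList ++ [':']) ::
        s.map (fun p => pvEntryLine p.1 p.2), pvEndSolid l := by
      intro t s x hx
      simp only [List.mem_cons, List.mem_map] at hx
      rcases hx with rfl | ⟨p, -, rfl⟩
      · exact pvEndSolid_title _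
      · exact pvEndSolid_entry _ _
    cases hc1 : (PySem.Dict.mk taxonomy).contains "processing_levels" with
    | false =>
      cases hc2 : (PySem.Dict.mk taxonomy).contains "knowledge_domains" with
      | false =>
        simp only [pvRenderB, hc1, hc2, Bool.false_eq_true, if_false, List.append_nil]
        exact pvCase [] _ (by simp only [hH, List.flatMap_nil])
          (by intro x hx; simp at hx)
      | true =>
        simp only [pvRenderB, hc1, hc2, Bool.false_eq_true, if_false, if_true,
          List.append_assoc, List.cons_append, List.nil_append, List.append_nil]
        rw [PySem.List.foldl_append_eq_flatMap]
        rw [pvCase (("Knowledge Domains".toList ++ [':']) ::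
              ((PySem.Dict.mk taxonomy).getD "knowledge_domains" []).map
                (fun p => pvEntryLine p.1 p.2))
            ("Taxonomy Classification:\n".toList ++ "Knowledge Domains:\n".toList ++
              List.flatMap (fun p => pvEntryLine p.1 p.2 ++ ['\n'])
                ((PySem.Dict.mk taxonomy).getD "knowledge_domains" []))
            (by simp only [hH, hK, List.flatMap_cons, List.flatMap_map, List.append_assoc,
              List.cons_append, List.nil_append])
            (hends1 _ _)]
        simp only [pvEntriesB_flat, List.flatMap_cons, List.flatMap_map, List.append_assoc,
          List.cons_append, List.nil_append]
    | true =>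
      cases hc2 : (PySem.Dict.mk taxonomy).contains "knowledge_domains" with
      | false =>
        simp only [pvRenderB, hc1, hc2, Bool.false_eq_true, if_false, if_true,
          List.append_assoc, List.cons_append, List.nil_append, List.append_nil]
        rw [PySem.List.foldl_append_eq_flatMap]
        rw [pvCase (("Processing Levels".toList ++ [':']) ::
              ((PySem.Dict.mk taxonomy).getD "processing_levels" []).map
                (fun p => pvEntryLine p.1 p.2))
            ("Taxonomy Classification:\n".toList ++ "Processing Levels:\n".toList ++
              List.flatMap (fun p => pvEntryLine p.1 p.2 ++ ['\n'])
                ((PySem.Dict.mk taxonomy).getD "processing_levels" []))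
            (by simp only [hH, hP, List.flatMap_cons, List.flatMap_map, List.append_assoc,
              List.cons_append, List.nil_append])
            (hends1 _ _)]
        simp only [pvEntriesB_flat, List.flatMap_cons, List.flatMap_map, List.append_assoc,
          List.cons_append, List.nil_append]
      | true =>
        simp only [pvRenderB, hc1, hc2, if_true,
          List.append_assoc, List.cons_append, List.nil_append, List.append_nil]
        rw [PySem.List.foldl_append_eq_flatMap, PySem.List.foldl_append_eq_flatMap]
        rw [pvCase (("Processing Levels".toList ++ [':']) ::
              (((PySem.Dict.mk taxonomy).getD "processing_levels" []).map
                  (fun p => pvEntryLine p.1 p.2) ++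
                ("Knowledge Domains".toList ++ [':']) ::
                  ((PySem.Dict.mk taxonomy).getD "knowledge_domains" []).map
                    (fun p => pvEntryLine p.1 p.2)))
            ("Taxonomy Classification:\n".toList ++ "Processing Levels:\n".toList ++
              List.flatMap (fun p => pvEntryLine p.1 p.2 ++ ['\n'])
                ((PySem.Dict.mk taxonomy).getD "processing_levels" []) ++
              "Knowledge Domains:\n".toList ++
              List.flatMap (fun p => pvEntryLine p.1 p.2 ++ ['\n'])
                ((PySem.Dict.mk taxonomy).getD "knowledge_domains" []))
            (by simp only [hH, hP, hK, List.flatMap_cons, List.flatMap_append, List.flatMap_map,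
              List.append_assoc, List.cons_append, List.nil_append])
            (by
              intro x hx
              simp only [List.mem_cons, List.mem_append, List.mem_map] at hx
              rcases hx with rfl | ⟨p, -, rfl⟩ | rfl | ⟨p, -, rfl⟩
              · exact pvEndSolid_title _
              · exact pvEndSolid_entry _ _
              · exact pvEndSolid_title _
              · exact pvEndSolid_entry _ _)]
        simp only [pvEntriesB_flat, List.flatMap_cons, List.flatMap_append, List.flatMap_map,
          List.append_assoc, List.cons_append, List.nil_append]
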